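-- pv_equiv track=rewrite | github.com/andrasfe/specter | specter/branch_instrumenter.py | _apply_insertions
-- ===== SOURCE A (Python) =====
-- def _apply_insertions(
--     para_lines: list[str],
--     start_line: int,
--     insertions: list[tuple[int, list[str]]],
-- ) -> list[str]:
--     """Apply insertion plan while preserving all original paragraph lines exactly."""
--     by_after_line: dict[int, list[str]] = {}
--     for after_line, lines_to_insert in insertions:
--         by_after_line.setdefault(after_line, []).extend(lines_to_insert)
--
--     result: list[str] = []
--     for idx, original in enumerate(para_lines):
--         physical_line = start_line + idx + 1
--         result.append(original)
--         result.extend(by_after_line.get(physical_line, []))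
--     return result
-- ===== SOURCE B (Python) =====
-- def _apply_insertions(
--     para_lines: list[str],
--     start_line: int,
--     insertions: list[tuple[int, list[str]]],
-- ) -> list[str]:
--     """Merge the insertions, stably sorted by line, against the lines with a cursor."""
--     result: list[str] = []
--     cur = 0
--     n = len(para_lines)
--     for after_line, lines_to_insert in sorted(insertions, key=lambda ins: ins[0]):
--         target = after_line - start_line - 1
--         if target < 0 or target >= n:
--             continue
--         result.extend(para_lines[cur:target + 1])
--         result.extend(lines_to_insert)
--         cur = target + 1
--     result.extend(para_lines[cur:])
--     return result
-- ===== Notes on version B (the rewrite author's own statement) =====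
-- stated objective: alternative
-- what changed: Replaces the dict-grouping plus per-line lookup with a stable sort of the insertions by after_line and a single cursor merge against the line list, dropping out-of-range targets and appending the remaining tail.
import Mathlib
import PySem

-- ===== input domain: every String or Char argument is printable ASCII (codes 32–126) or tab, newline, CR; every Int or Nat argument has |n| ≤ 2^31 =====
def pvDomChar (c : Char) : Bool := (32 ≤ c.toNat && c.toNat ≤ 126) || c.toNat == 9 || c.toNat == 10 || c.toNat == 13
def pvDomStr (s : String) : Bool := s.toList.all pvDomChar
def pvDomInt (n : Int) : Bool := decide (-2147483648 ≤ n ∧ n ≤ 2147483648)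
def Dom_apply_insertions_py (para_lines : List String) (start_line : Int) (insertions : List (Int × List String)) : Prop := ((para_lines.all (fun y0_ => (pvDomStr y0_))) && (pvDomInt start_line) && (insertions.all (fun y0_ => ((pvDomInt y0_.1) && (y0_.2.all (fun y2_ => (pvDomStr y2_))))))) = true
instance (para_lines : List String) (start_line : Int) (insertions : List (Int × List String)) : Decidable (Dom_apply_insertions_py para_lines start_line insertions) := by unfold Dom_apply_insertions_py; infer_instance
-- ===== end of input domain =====

-- B replaces A's dict grouping + per-line lookup by a stable sort of the insertions and a
-- single cursor merge against the lines (objective: alternative algorithm of similar cost).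

-- ===== PORT A =====
def apply_insertions_py (para_lines : List String) (start_line : Int) (insertions : List (Int × List String)) : List String :=
  -- by_after_line.setdefault(after_line, []).extend(lines_to_insert) mutates the stored
  -- list in place; exactly d[a] = d.get(a, []) + ls, i.e. PySem.Dict.modify.
  let by_after_line : PySem.Dict Int (List String) :=
    insertions.foldl (fun d p => d.modify p.1 [] (fun cur => cur ++ p.2)) PySem.Dict.empty
  (PySem.List.enumerate para_lines 0).foldl
    (fun result p => result ++ [p.2] ++ by_after_line.getD (start_line + p.1 + 1) []) []

-- ===== PORT B =====
def apply_insertions_py_alt (para_lines : List String) (start_line : Int) (insertions : List (Int × List String)) : List String :=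
  let n : Int := para_lines.length
  let st := (PySem.List.sorted insertions (fun p => p.1) false).foldl
    (fun (acc : List String × Int) p =>
      let target := p.1 - start_line - 1
      if target < 0 ∨ n ≤ target then acc
      else (acc.1 ++ PySem.List.slice para_lines (some acc.2) (some (target + 1)) ++ p.2,
            target + 1))
    ([], 0)
  st.1 ++ PySem.List.slice para_lines (some st.2) none

-- ===== PRECONDITION & SPEC =====
def Spec_apply_insertions_py (para_lines : List String) (start_line : Int) (insertions : List (Int × List String)) (out : List String) : Prop := out = apply_insertions_py_alt para_lines start_line insertions
instance (para_lines : List String) (start_line : Int) (insertions : List (Int × List String)) (out : List String) : Decidable (Spec_apply_insertions_py para_lines start_line insertions out) := by unfold Spec_apply_insertions_py; infer_instance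

-- ===== CLAIM (what is proved, stated in full; the proofs are below) =====
def Claim_equal_apply_insertions_py : Prop := ∀ (para_lines : List String) (start_line : Int) (insertions : List (Int × List String)), Dom_apply_insertions_py para_lines start_line insertions → Spec_apply_insertions_py para_lines start_line insertions (apply_insertions_py para_lines start_line insertions)

-- ===== LEMMAS AND PROOFS =====

-- `interleave g xs i` = the lines xs, each line at physical number i, i+1, … followed by its group.
def pvInterleave (g : Int → List String) : List String → Int → List String
  | [], _ => []
  | x :: xs, i => (x :: g i) ++ pvInterleave g xs (i + 1)

-- group of physical line k drawn from an insertion list l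
def pvGroup (l : List (Int × List String)) (k : Int) : List String :=
  (l.filter (fun p => p.1 == k)).flatMap (·.2)

-- A's dict, looked up with default [], is exactly the grouping of the insertion list.
theorem pvGetD_group (l : List (Int × List String)) (d : PySem.Dict Int (List String)) (k : Int) :
    (l.foldl (fun d p => d.modify p.1 [] (fun cur => cur ++ p.2)) d).getD k []
      = d.getD k [] ++ pvGroup l k := by
  induction l generalizing d with
  | nil => simp [pvGroup]
  | cons p rest ih =>
      simp only [List.foldl_cons, ih, pvGroup, List.filter_cons]
      rw [PySem.Dict.getD_modify]
      by_cases h : k = p.1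
      · simp [h, List.append_assoc]
      · have : (p.1 == k) = false := by simp [Ne.symm h]
        simp [h, this]

-- A's output loop is pvInterleave of the dict lookups.
theorem pvA_loop (by_ : PySem.Dict Int (List String)) (start_line : Int)
    (xs : List String) (k : Int) (res : List String) :
    (PySem.List.enumerate xs k).foldl
        (fun result p => result ++ [p.2] ++ by_.getD (start_line + p.1 + 1) []) res
      = res ++ pvInterleave (fun c => by_.getD c []) xs (start_line + k + 1) := by
  induction xs generalizing k res with
  | nil => simp [PySem.List.enumerate_nil, pvInterleave]
  | cons x xs ih =>
      rw [PySem.List.enumerate_cons]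
      simp only [List.foldl_cons, pvInterleave, ih]
      have : start_line + (k + 1) + 1 = start_line + k + 1 + 1 := by ring
      rw [this]
      simp [List.append_assoc]

-- pvInterleave congruence / emptiness / append
theorem pvInterleave_congr (g g' : Int → List String) (xs : List String) (i : Int)
    (h : ∀ j, i ≤ j → j < i + xs.length → g j = g' j) :
    pvInterleave g xs i = pvInterleave g' xs i := by
  induction xs generalizing i with
  | nil => rfl
  | cons x xs ih =>
      simp only [pvInterleave]
      rw [h i (le_refl i) (by simp only [List.length_cons]; push_cast; omega),
          ih (i + 1) (fun j h1 h2 => h j (by omega) (by simp only [List.length_cons] at h2 ⊢; push_cast at h2 ⊢; omega))]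

theorem pvInterleave_nil_groups (g : Int → List String) (xs : List String) (i : Int)
    (h : ∀ j, i ≤ j → j < i + xs.length → g j = []) :
    pvInterleave g xs i = xs := by
  induction xs generalizing i with
  | nil => rfl
  | cons x xs ih =>
      simp only [pvInterleave]
      rw [h i (le_refl i) (by simp only [List.length_cons]; push_cast; omega),
          ih (i + 1) (fun j h1 h2 => h j (by omega) (by simp only [List.length_cons] at h2 ⊢; push_cast at h2 ⊢; omega))]
      rfl

-- stability of PySem.List.sorted: filtering one key commutes with the sort
theorem pvInsertBy_filter (key : (Int × List String) → Int) (k : Int)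
    (x : Int × List String) (acc : List (Int × List String))
    (hs : acc.Pairwise (fun a b => key a ≤ key b)) :
    (PySem.List.insertBy (fun a b => decide (key a < key b)) x acc).filter (fun p => key p == k)
      = acc.filter (fun p => key p == k) ++ if key x == k then [x] else [] := by
  induction acc with
  | nil => simp [PySem.List.insertBy, List.filter_cons]
  | cons y ys ih =>
      have hy : ∀ q ∈ ys, key y ≤ key q := (List.pairwise_cons.mp hs).1
      have hys : ys.Pairwise (fun a b => key a ≤ key b) := (List.pairwise_cons.mp hs).2
      simp only [PySem.List.insertBy]
      by_cases hlt : key x < key y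
      · simp only [hlt, decide_true, if_true]
        by_cases hk : key x == k
        · have hkx : key x = k := by simpa using hk
          have hnil : (y :: ys).filter (fun p => key p == k) = [] := by
            rw [List.filter_eq_nil_iff]
            intro q hq
            have hyq : key y ≤ key q := by
              rcases List.mem_cons.mp hq with rfl | hq'
              · exact le_refl _
              · exact hy q hq'
            simp only [beq_iff_eq]
            omega
          rw [List.filter_cons_of_pos (by simpa using hk), hnil]
          simp [hkx]
        · simp [List.filter_cons, hk]
      · simp only [hlt, decide_false, Bool.false_eq_true, if_false]
        rw [List.filter_cons, ih hys]
        by_cases hk : key y == k <;> simp [hk]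

theorem pvSorted_filter (key : (Int × List String) → Int) (k : Int)
    (l : List (Int × List String)) :
    (PySem.List.sorted l key false).filter (fun p => key p == k)
      = l.filter (fun p => key p == k) := by
  induction l using List.reverseRecOn with
  | nil => simp [PySem.List.sorted_eq_foldl_insertBy]
  | append_singleton xs x ih =>
      have hfold : PySem.List.sorted (xs ++ [x]) key false
          = PySem.List.insertBy (fun a b => decide (key a < key b)) x (PySem.List.sorted xs key false) := by
        rw [PySem.List.sorted_eq_foldl_insertBy, PySem.List.sorted_eq_foldl_insertBy, List.foldl_append]
        rfl
      rw [hfold, pvInsertBy_filter key k x _ (PySem.List.sorted_pairwise xs key),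
          ih, List.filter_append, List.filter_cons]
      by_cases hk : key x == k <;> simp [hk]

-- the reference function F: the merge written as structural recursion producing the final list
def pvF (para : List String) (start : Int) : Nat → List (Int × List String) → List String
  | c, [] => para.drop c
  | c, p :: rest =>
      if p.1 - start - 1 < 0 ∨ (para.length : Int) ≤ p.1 - start - 1 then pvF para start c rest
      else PySem.List.slice para (some (c : Int)) (some (p.1 - start - 1 + 1)) ++ p.2
            ++ pvF para start (p.1 - start - 1 + 1).toNat rest

-- B's fold computes pvF
theorem pvFold_F (para : List String) (start : Int) (s : List (Int × List String))
    (res : List String) (c : Nat) :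
    ((s.foldl (fun (acc : List String × Int) p =>
        let target := p.1 - start - 1
        if target < 0 ∨ (para.length : Int) ≤ target then acc
        else (acc.1 ++ PySem.List.slice para (some acc.2) (some (target + 1)) ++ p.2,
              target + 1)) (res, (c : Int))).1
      ++ PySem.List.slice para (some (s.foldl (fun (acc : List String × Int) p =>
        let target := p.1 - start - 1
        if target < 0 ∨ (para.length : Int) ≤ target then acc
        else (acc.1 ++ PySem.List.slice para (some acc.2) (some (target + 1)) ++ p.2,
              target + 1)) (res, (c : Int))).2) none)
      = res ++ pvF para start c s := by
  induction s generalizing res c with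
  | nil =>
      simp only [List.foldl_nil, pvF]
      rw [PySem.List.slice_from_natCast]
  | cons p rest ih =>
      simp only [List.foldl_cons, pvF]
      by_cases h : p.1 - start - 1 < 0 ∨ (para.length : Int) ≤ p.1 - start - 1
      · simp only [h, if_true, ih]
      · have ht : 0 ≤ p.1 - start - 1 := by omega
        have hcast : p.1 - start - 1 + 1 = (((p.1 - start - 1 + 1).toNat : Nat) : Int) := by omega
        simp only [h, if_false]
        rw [hcast, ih]
        simp only [List.append_assoc]
        have hn : (p.1 - start).toNat = (max (p.1 - start) 0).toNat := by omega
        simp [hn]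

-- skipping out-of-range insertions = filtering them away up front
theorem pvF_filter (para : List String) (start : Int) (c : Nat) (s : List (Int × List String)) :
    pvF para start c s
      = pvF para start c (s.filter (fun p =>
          decide (0 ≤ p.1 - start - 1 ∧ p.1 - start - 1 < (para.length : Int)))) := by
  induction s generalizing c with
  | nil => rfl
  | cons p rest ih =>
      simp only [pvF, List.filter_cons]
      by_cases h : p.1 - start - 1 < 0 ∨ (para.length : Int) ≤ p.1 - start - 1
      · have : (decide (0 ≤ p.1 - start - 1 ∧ p.1 - start - 1 < (para.length : Int))) = false := by
          simp; omega
        simp only [h, if_true, this, Bool.false_eq_true, if_false, ih]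
      · have : (decide (0 ≤ p.1 - start - 1 ∧ p.1 - start - 1 < (para.length : Int))) = true := by
          simp; omega
        simp only [h, if_false, this, if_true, pvF, ih]

theorem pvGroup_cons (p : Int × List String) (rest : List (Int × List String)) (j : Int) :
    pvGroup (p :: rest) j = (if p.1 = j then p.2 else []) ++ pvGroup rest j := by
  simp only [pvGroup, List.filter_cons]
  by_cases h : p.1 = j <;> simp [h]

theorem pvGroup_eq_nil (l : List (Int × List String)) (j : Int) (h : ∀ q ∈ l, q.1 ≠ j) :
    pvGroup l j = [] := by
  simp only [pvGroup]
  rw [List.filter_eq_nil_iff.mpr (fun q hq => by simp [h q hq])]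
  rfl

-- skip over m lines whose groups are empty
theorem pvInterleave_skip (g : Int → List String) (xs : List String) (i : Int) (m : Nat)
    (hm : m < xs.length) (hnil : ∀ j, i ≤ j → j < i + m → g j = []) :
    pvInterleave g xs i
      = xs.take m ++ (xs[m]'hm :: g (i + m)) ++ pvInterleave g (xs.drop (m + 1)) (i + m + 1) := by
  induction m generalizing xs i with
  | zero =>
      cases xs with
      | nil => simp at hm
      | cons x rest => simp [pvInterleave]
  | succ m ih =>
      cases xs with
      | nil => simp at hm
      | cons x rest =>
          have hm' : m < rest.length := by simp at hm; omega
          simp only [pvInterleave]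
          rw [hnil i (le_refl i) (by push_cast; omega),
              ih rest (i + 1) hm' (fun j h1 h2 => hnil j (by omega) (by push_cast at h2 ⊢; omega))]
          have h1 : i + 1 + (m : Int) = i + (m + 1 : Nat) := by push_cast; ring
          rw [h1]
          simp [List.take_succ_cons, List.drop_succ_cons, List.getElem_cons_succ]

-- main characterisation of the merge, for in-range, key-sorted insertion lists
theorem pvF_spec (para : List String) (start : Int) (s : List (Int × List String))
    (hs : s.Pairwise (fun a b => a.1 ≤ b.1)) (c : Nat) (hc : c ≤ para.length)
    (hin : ∀ p ∈ s, start + 1 ≤ p.1 ∧ p.1 ≤ start + para.length)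
    (hlo : ∀ p ∈ s, start + c ≤ p.1) :
    pvF para start c s
      = pvGroup s (start + c) ++ pvInterleave (pvGroup s) (para.drop c) (start + c + 1) := by
  induction s generalizing c with
  | nil =>
      rw [pvInterleave_nil_groups _ _ _ (fun j _ _ => by simp [pvGroup])]
      simp [pvGroup, pvF]
  | cons p rest ih =>
      obtain ⟨hp1, hp2⟩ := hin p (List.mem_cons_self ..)
      have hrest_pw : rest.Pairwise (fun a b => a.1 ≤ b.1) := (List.pairwise_cons.mp hs).2
      have hple : ∀ q ∈ rest, p.1 ≤ q.1 := (List.pairwise_cons.mp hs).1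
      have hlop : start + c ≤ p.1 := hlo p (List.mem_cons_self ..)
      have hcond : ¬(p.1 - start - 1 < 0 ∨ (para.length : Int) ≤ p.1 - start - 1) := by omega
      simp only [pvF, hcond, if_false]
      set c' : Nat := (p.1 - start - 1 + 1).toNat with hc'def
      have hc'int : (c' : Int) = p.1 - start := by omega
      have hcc' : c ≤ c' := by omega
      have hc'n : c' ≤ para.length := by omega
      have hrec := ih hrest_pw c' hc'n (fun q hq => hin q (List.mem_cons_of_mem _ hq))
          (fun q hq => by have := hple q hq; omega)
      rw [hrec]
      have hstc' : start + (c' : Int) = p.1 := by omega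
      have hslice : PySem.List.slice para (some (c : Int)) (some (p.1 - start - 1 + 1))
          = (para.drop c).take (c' - c) := by
        rw [PySem.List.slice_toNat]
        congr 1
        · omega
        · omega
      rw [hslice, hstc']
      by_cases hcase : start + (c : Int) = p.1
      · -- the head inserts right at the cursor: empty slice
        have hceq : c' = c := by omega
        rw [pvGroup_cons, if_pos (by omega),
            pvInterleave_congr (pvGroup (p :: rest)) (pvGroup rest) _ _
              (fun j h1 h2 => by rw [pvGroup_cons, if_neg (by omega)]; rfl)]
        simp [hceq, hcase]
      · -- the head is strictly ahead: emit the slice up to its line first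
        have hdpos : c < c' := by omega
        have hgnil : pvGroup (p :: rest) (start + (c : Int)) = [] :=
          pvGroup_eq_nil _ _ (fun q hq => by
            rcases List.mem_cons.mp hq with rfl | hq'
            · omega
            · have := hple q hq'; omega)
        rw [hgnil, List.nil_append]
        have hm : c' - c - 1 < (para.drop c).length := by simp [List.length_drop]; omega
        rw [pvInterleave_skip (pvGroup (p :: rest)) (para.drop c) _ (c' - c - 1) hm
              (fun j h1 h2 => pvGroup_eq_nil _ _ (fun q hq => by
                rcases List.mem_cons.mp hq with rfl | hq'
                · omega
                · have := hple q hq'; omega))]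
        have hidx : start + (c : Int) + 1 + ((c' - c - 1 : Nat) : Int) = p.1 := by omega
        rw [hidx]
        rw [pvGroup_cons, if_pos rfl]
        have hdrop : (para.drop c).drop (c' - c - 1 + 1) = para.drop c' := by
          rw [List.drop_drop]; congr 1; omega
        have hidx2 : p.1 + 1 = start + (c' : Int) + 1 := by omega
        rw [hdrop, hidx2,
            pvInterleave_congr (pvGroup (p :: rest)) (pvGroup rest) _ _
              (fun j h1 h2 => by rw [pvGroup_cons, if_neg (by omega)]; rfl)]
        have htake : (para.drop c).take (c' - c)
            = (para.drop c).take (c' - c - 1) ++ ((para.drop c)[c' - c - 1]?).toList := by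
          have h : c' - c = (c' - c - 1) + 1 := by omega
          conv_lhs => rw [h]
          rw [List.take_add_one]
        rw [htake, List.getElem?_eq_getElem hm]
        simp [List.append_assoc]

-- groups drawn from the in-range-filtered sorted list agree with A's groups on in-range lines
theorem pvGroup_in_range (ins : List (Int × List String)) (start : Int) (para : List String)
    (j : Int) (h1 : start + 1 ≤ j) (h2 : j < start + 1 + para.length) :
    pvGroup ((PySem.List.sorted ins (fun p => p.1) false).filter
        (fun p => decide (0 ≤ p.1 - start - 1 ∧ p.1 - start - 1 < (para.length : Int)))) j
      = pvGroup ins j := by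
  unfold pvGroup
  rw [List.filter_filter,
      List.filter_congr (q := fun p => p.1 == j) (fun a _ => by
        by_cases h : a.1 = j
        · simp [h]; omega
        · simp [h])]
  have hst := pvSorted_filter (fun p => p.1) j ins
  simp only [] at hst
  rw [hst]

-- ===== VERDICT (by name: the statement is the Claim_ definition above) =====
theorem apply_insertions_py_spec : Claim_equal_apply_insertions_py := by
  intro para start ins _hdom
  unfold Spec_apply_insertions_py
  simp only [apply_insertions_py, apply_insertions_py_alt]
  rw [pvA_loop]
  have hfold := pvFold_F para start (PySem.List.sorted ins (fun p => p.1) false) [] 0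
  simp only [Nat.cast_zero] at hfold
  rw [hfold]
  simp only [List.nil_append]
  rw [pvF_filter]
  set s' := (PySem.List.sorted ins (fun p => p.1) false).filter
      (fun p => decide (0 ≤ p.1 - start - 1 ∧ p.1 - start - 1 < (para.length : Int))) with hs'def
  have hmem : ∀ q ∈ s', start + 1 ≤ q.1 ∧ q.1 ≤ start + (para.length : Int) := by
    intro q hq
    have h := (List.mem_filter.mp hq).2
    simp only [decide_eq_true_eq] at h
    omega
  rw [pvF_spec para start s'
        ((PySem.List.sorted_pairwise ins (fun p => p.1)).filter _)
        0 (Nat.zero_le _) hmem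
        (fun q hq => by have := hmem q hq; push_cast; omega)]
  simp only [Nat.cast_zero, add_zero, List.drop_zero]
  rw [pvGroup_eq_nil s' start (fun q hq => by have := hmem q hq; omega), List.nil_append]
  apply pvInterleave_congr
  intro j hj1 hj2
  rw [pvGetD_group]
  simp only [PySem.Dict.getD_empty, List.nil_append]
  exact (pvGroup_in_range ins start para j (by omega) (by omega)).symm
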